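-- pv_equiv track=rewrite | github.com/CyberSecurityN00b/shellfeck | generated_shellfeck_instructions.py | generate_bf_simple_delta
-- ===== SOURCE A (Python) =====
-- def generate_bf_simple_delta(cmd):
--     result = ""
--
--     for i,c in enumerate(cmd):
--         if i == 0:
--             result += "+"*ord(c) + "."
--         else:
--             d = ord(cmd[i]) - ord(cmd[i-1])
--             if d > 0:
--                 result += "+"*d + "."
--             else:
--                 result += "-"*abs(d) + "."
--
--
--     result += ","
--     return result
-- ===== SOURCE B (Python) =====
-- def generate_bf_simple_delta(cmd):
--     # Output-driven simulation: walk a virtual BF cell toward each target code,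
--     # emitting one output character per step, instead of concatenating per-character segments.
--     out = []
--     cell = 0
--     i = 0
--     n = len(cmd)
--     while i < n:
--         t = ord(cmd[i])
--         if cell < t:
--             out.append("+")
--             cell += 1
--         elif cell > t:
--             out.append("-")
--             cell -= 1
--         else:
--             out.append(".")
--             i += 1
--     out.append(",")
--     return "".join(out)
-- ===== Notes on version B (the rewrite author's own statement) =====
-- stated objective: alternative
-- what changed: B replaces A's per-character segment concatenation ('+'*d + '.') with an output-driven simulation of the BF cell: a single while loop that keeps a virtual cell value and emits exactly one output character per iteration ('+'/'-' stepping the cell toward the current target, '.' advancing to the next character), collecting characters in a list joined once at the end.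
import Mathlib
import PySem

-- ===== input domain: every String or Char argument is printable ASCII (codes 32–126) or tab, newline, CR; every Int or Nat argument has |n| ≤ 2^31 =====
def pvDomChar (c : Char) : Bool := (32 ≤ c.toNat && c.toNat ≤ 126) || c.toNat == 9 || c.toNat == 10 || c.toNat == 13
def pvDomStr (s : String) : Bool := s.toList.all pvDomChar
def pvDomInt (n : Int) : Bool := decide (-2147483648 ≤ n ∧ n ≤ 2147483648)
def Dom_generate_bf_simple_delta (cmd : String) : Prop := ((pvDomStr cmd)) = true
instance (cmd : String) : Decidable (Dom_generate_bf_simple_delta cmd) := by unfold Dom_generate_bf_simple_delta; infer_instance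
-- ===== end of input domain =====

-- B replaces A's per-character segment concatenation by an output-driven simulation of the
-- BF cell (one while loop emitting one character per iteration); alternative algorithm, same cost.


-- ===== PORT A =====
def generate_bf_simple_delta (cmd : String) : String :=
  let cs := cmd.toList
  let result : String :=
    (PySem.List.enumerate cs).foldl (fun result ic =>
      let i := ic.1
      let c := ic.2
      if i = 0 then
        result ++ String.ofList (List.replicate c.toNat '+') ++ "."
      else
        -- cmd[i] and cmd[i-1]: indices always in range here, pyGetD is exact
        let d : Int := (PySem.List.pyGetD cs i ' ').toNat - (PySem.List.pyGetD cs (i - 1) ' ').toNat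
        if d > 0 then
          result ++ String.ofList (List.replicate d.toNat '+') ++ "."
        else
          result ++ String.ofList (List.replicate d.natAbs '-') ++ ".") ""
  result ++ ","

-- ===== PORT B =====
-- ord(cmd[i]) for an in-range index (getD is exact there)
def pvCode (cs : List Char) (i : Nat) : Int := ((cs.getD i ' ').toNat : Int)

-- Source B's while loop: one output character per iteration, cell stepped toward the target code
def pvLoop (cs : List Char) (cell : Int) (i : Nat) : List Char :=
  if h : i < cs.length then
    if cell < pvCode cs i then '+' :: pvLoop cs (cell + 1) i
    else if pvCode cs i < cell then '-' :: pvLoop cs (cell - 1) i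
    else '.' :: pvLoop cs cell (i + 1)
  else [',']
termination_by (cs.length - i, (pvCode cs i - cell).natAbs)
decreasing_by
  · apply Prod.Lex.right; omega
  · apply Prod.Lex.right; omega
  · apply Prod.Lex.left; omega

def generate_bf_simple_delta_alt (cmd : String) : String :=
  String.ofList (pvLoop cmd.toList 0 0)

-- ===== PRECONDITION & SPEC =====
def Spec_generate_bf_simple_delta (cmd : String) (out : String) : Prop := out = generate_bf_simple_delta_alt cmd
instance (cmd : String) (out : String) : Decidable (Spec_generate_bf_simple_delta cmd out) := by unfold Spec_generate_bf_simple_delta; infer_instance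

-- ===== CLAIM (what is proved, stated in full; the proofs are below) =====
def Claim_equal_generate_bf_simple_delta : Prop := ∀ (cmd : String), Dom_generate_bf_simple_delta cmd → Spec_generate_bf_simple_delta cmd (generate_bf_simple_delta cmd)

-- ===== LEMMAS AND PROOFS =====

-- the segment A emits for enumerate entry ic over character list cs
def pvSegA (cs : List Char) (ic : Int × Char) : String :=
  if ic.1 = 0 then String.ofList (List.replicate ic.2.toNat '+') ++ "."
  else
    let d : Int := (PySem.List.pyGetD cs ic.1 ' ').toNat - (PySem.List.pyGetD cs (ic.1 - 1) ' ').toNat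
    if d > 0 then String.ofList (List.replicate d.toNat '+') ++ "."
    else String.ofList (List.replicate d.natAbs '-') ++ "."

-- the characters needed to move a cell from cp.2 to cp.1 and print
def pvSegL (cp : Int × Int) : List Char :=
  (if cp.1 - cp.2 > 0 then List.replicate (cp.1 - cp.2).toNat '+'
   else List.replicate (-(cp.1 - cp.2)).toNat '-') ++ ['.']

-- reference: segment list for codes xs starting from cell value prev, then ','
def pvRefL (prev : Int) : List Int → List Char
  | [] => [',']
  | t :: rest => pvSegL (t, prev) ++ pvRefL t rest

-- (current, previous) code pairs
def pvDP (prev : Int) : List Int → List (Int × Int)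
  | [] => []
  | x :: xs => (x, prev) :: pvDP x xs

theorem pvDP_length (xs : List Int) (prev : Int) : (pvDP prev xs).length = xs.length := by
  induction xs generalizing prev with
  | nil => rfl
  | cons x xs ih => simp [pvDP, ih]

theorem pvDP_getElem (xs : List Int) (prev : Int) (k : Nat) (hk : k < xs.length) :
    (pvDP prev xs)[k]'(by rw [pvDP_length]; exact hk) =
      (xs[k], if k = 0 then prev else xs[k-1]'(by omega)) := by
  induction xs generalizing prev k with
  | nil => simp at hk
  | cons x xs ih =>
    cases k with
    | zero => rfl
    | succ n =>
      cases xs with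
      | nil => simp at hk
      | cons y ys =>
        have hk' : n < (y :: ys).length := by simpa using Nat.lt_of_succ_lt_succ hk
        show (pvDP x (y :: ys))[n]'(by rw [pvDP_length]; simpa using hk') = _
        rw [ih x n hk']
        rcases n with _ | m <;> simp

theorem pvFoldl_out (l : List String) (a : String) :
    l.foldl (· ++ ·) a = a ++ l.foldl (· ++ ·) "" := by
  induction l generalizing a with
  | nil => simp
  | cons x xs ih =>
    rw [List.foldl_cons, List.foldl_cons, ih (a ++ x), ih ("" ++ x)]
    simp [String.append_assoc]

theorem pvJoin_cons (s : String) (l : List String) :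
    String.join (s :: l) = s ++ String.join l := by
  show (s :: l).foldl (· ++ ·) "" = s ++ l.foldl (· ++ ·) ""
  rw [List.foldl_cons, pvFoldl_out]
  simp

theorem pvFoldl_join {α : Type} (l : List α) (f : α → String) (acc : String) :
    l.foldl (fun r x => r ++ f x) acc = acc ++ String.join (l.map f) := by
  induction l generalizing acc with
  | nil => simp [String.join]
  | cons x xs ih => simp [ih, pvJoin_cons, String.append_assoc]

theorem pvSegL_str (cp : Int × Int) :
    String.ofList (pvSegL cp) =
      (if cp.1 - cp.2 > 0 then String.ofList (List.replicate (cp.1 - cp.2).toNat '+')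
       else String.ofList (List.replicate (-(cp.1 - cp.2)).toNat '-')) ++ "." := by
  unfold pvSegL
  split_ifs <;> rw [String.ofList_append]

theorem pvSeg_eq (cs : List Char) (k : Nat) (hk : k < cs.length) :
    pvSegA cs ((k : Int), cs[k]) =
      String.ofList (pvSegL (((cs.map fun c => (c.toNat : Int))[k]'(by simpa using hk),
               if k = 0 then 0 else (cs.map fun c => (c.toNat : Int))[k-1]'(by simp; omega)))) := by
  rw [pvSegL_str]
  simp only [pvSegA, List.getElem_map]
  by_cases h0 : k = 0
  · subst h0
    by_cases hc : 0 < cs[0].toNat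
    · simp [hc]
    · have : cs[0].toNat = 0 := by omega
      simp [this]
  · have hki : ((k : Int)) ≠ 0 := by exact_mod_cast h0
    rw [if_neg hki, if_neg h0]
    have e1 : PySem.List.pyGetD cs (k : Int) ' ' = cs[k] := by
      rw [PySem.List.pyGetD_natCast]; simp [List.getD_eq_getElem?_getD, hk]
    have e2 : PySem.List.pyGetD cs ((k : Int) - 1) ' ' = cs[k-1]'(by omega) := by
      have h : ((k : Int) - 1) = ((k - 1 : Nat) : Int) := by omega
      rw [h, PySem.List.pyGetD_natCast]
      have hk1 : k - 1 < cs.length := Nat.lt_of_le_of_lt (Nat.pred_le k) hk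
      simp [List.getD_eq_getElem?_getD, List.getElem?_eq_getElem hk1]
    rw [e1, e2]
    set a : Int := (cs[k].toNat : Int) with ha
    set b : Int := ((cs[k-1]'(by omega)).toNat : Int) with hb
    by_cases hd : a - b > 0
    · rw [if_pos hd, if_pos hd]
    · rw [if_neg hd, if_neg hd]
      congr 3
      omega

theorem pvJoin_ref (xs : List Int) : ∀ (prev : Int),
    String.join ((pvDP prev xs).map (fun p => String.ofList (pvSegL p))) ++ "," =
      String.ofList (pvRefL prev xs) := by
  induction xs with
  | nil =>
    intro prev
    simp [pvDP, pvRefL, String.join]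
  | cons x rest ih =>
    intro prev
    show String.join ((pvDP prev (x :: rest)).map _) ++ "," = _
    rw [show pvDP prev (x :: rest) = (x, prev) :: pvDP x rest from rfl]
    rw [List.map_cons, pvJoin_cons, String.append_assoc, ih x]
    rw [show pvRefL prev (x :: rest) = pvSegL (x, prev) ++ pvRefL x rest from rfl]
    rw [String.ofList_append]

-- A equals the reference segment list, read as a string
theorem pvA_eq_ref (cmd : String) :
    generate_bf_simple_delta cmd =
      String.ofList (pvRefL 0 (cmd.toList.map fun c => (c.toNat : Int))) := by
  have hA : generate_bf_simple_delta cmd =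
      (PySem.List.enumerate cmd.toList).foldl
        (fun r ic => r ++ pvSegA cmd.toList ic) "" ++ "," := by
    have h1 : generate_bf_simple_delta cmd =
        (PySem.List.enumerate cmd.toList).foldl
          (fun (r : String) (ic : Int × Char) =>
            if ic.1 = 0 then r ++ String.ofList (List.replicate ic.2.toNat '+') ++ "."
            else
              let d : Int := (PySem.List.pyGetD cmd.toList ic.1 ' ').toNat -
                             (PySem.List.pyGetD cmd.toList (ic.1 - 1) ' ').toNat
              if d > 0 then r ++ String.ofList (List.replicate d.toNat '+') ++ "."
              else r ++ String.ofList (List.replicate d.natAbs '-') ++ ".") "" ++ "," := rfl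
    rw [h1]
    congr 1
    rw [show (fun (r : String) (ic : Int × Char) =>
            if ic.1 = 0 then r ++ String.ofList (List.replicate ic.2.toNat '+') ++ "."
            else
              let d : Int := (PySem.List.pyGetD cmd.toList ic.1 ' ').toNat -
                             (PySem.List.pyGetD cmd.toList (ic.1 - 1) ' ').toNat
              if d > 0 then r ++ String.ofList (List.replicate d.toNat '+') ++ "."
              else r ++ String.ofList (List.replicate d.natAbs '-') ++ ".")
          = (fun (r : String) (ic : Int × Char) => r ++ pvSegA cmd.toList ic) from by
        funext r ic
        simp only [pvSegA]
        split_ifs <;> simp [String.append_assoc]]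
  have hmap : (PySem.List.enumerate cmd.toList).map (pvSegA cmd.toList)
      = (pvDP 0 (cmd.toList.map fun c => (c.toNat : Int))).map
          (fun p => String.ofList (pvSegL p)) := by
    generalize cmd.toList = cs
    apply List.ext_getElem
    · simp [pvDP_length, PySem.List.length_enumerate]
    · intro k h1 h2
      have hk : k < cs.length := by
        simpa [PySem.List.length_enumerate] using h1
      have hk2 : k < (cs.map fun c => (c.toNat : Int)).length := by simpa using hk
      simp only [List.getElem_map]
      rw [PySem.List.getElem_enumerate, pvDP_getElem _ _ k hk2]
      simpa using pvSeg_eq cs k hk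
  rw [hA, pvFoldl_join, hmap]
  rw [show ("" ++ String.join ((pvDP 0 (cmd.toList.map fun c => (c.toNat : Int))).map
        (fun p => String.ofList (pvSegL p))) ++ ",")
      = String.join ((pvDP 0 (cmd.toList.map fun c => (c.toNat : Int))).map
        (fun p => String.ofList (pvSegL p))) ++ "," from by simp]
  exact pvJoin_ref _ 0

theorem pvLoop_exit (cs : List Char) (cell : Int) (i : Nat) (h : cs.length ≤ i) :
    pvLoop cs cell i = [','] := by
  rw [pvLoop, dif_neg (by omega)]

theorem pvLoop_dot (cs : List Char) (i : Nat) (h : i < cs.length) :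
    pvLoop cs (pvCode cs i) i = '.' :: pvLoop cs (pvCode cs i) (i + 1) := by
  rw [pvLoop, dif_pos h, if_neg (lt_irrefl _), if_neg (lt_irrefl _)]

theorem pvLoop_up (cs : List Char) (i : Nat) (h : i < cs.length) :
    ∀ (n : Nat) (cell : Int), cell + (n : Int) = pvCode cs i →
      pvLoop cs cell i = List.replicate n '+' ++ pvLoop cs (pvCode cs i) i := by
  intro n
  induction n with
  | zero =>
    intro cell hc
    have : cell = pvCode cs i := by omega
    simp [this]
  | succ m ih =>
    intro cell hc
    have hlt : cell < pvCode cs i := by push_cast at hc; omega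
    rw [pvLoop, dif_pos h, if_pos hlt, ih (cell + 1) (by push_cast at hc ⊢; omega)]
    simp [List.replicate_succ]

theorem pvLoop_down (cs : List Char) (i : Nat) (h : i < cs.length) :
    ∀ (n : Nat) (cell : Int), cell - (n : Int) = pvCode cs i →
      pvLoop cs cell i = List.replicate n '-' ++ pvLoop cs (pvCode cs i) i := by
  intro n
  induction n with
  | zero =>
    intro cell hc
    have : cell = pvCode cs i := by omega
    simp [this]
  | succ m ih =>
    intro cell hc
    have hlt : pvCode cs i < cell := by push_cast at hc; omega
    rw [pvLoop, dif_pos h, if_neg (by omega), if_pos hlt,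
      ih (cell - 1) (by push_cast at hc ⊢; omega)]
    simp [List.replicate_succ]

theorem pvLoop_step (cs : List Char) (i : Nat) (h : i < cs.length) (cell : Int) :
    pvLoop cs cell i = pvSegL (pvCode cs i, cell) ++ pvLoop cs (pvCode cs i) (i + 1) := by
  have hdot := pvLoop_dot cs i h
  unfold pvSegL
  by_cases hle : cell < pvCode cs i
  · rw [if_pos (by simp; omega)]
    rw [pvLoop_up cs i h (pvCode cs i - cell).toNat cell (by omega), hdot]
    simp
  · rw [if_neg (by simp; omega)]
    rw [pvLoop_down cs i h (cell - pvCode cs i).toNat cell (by omega), hdot]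
    have : (-(pvCode cs i - cell)).toNat = (cell - pvCode cs i).toNat := by omega
    rw [this]
    simp

theorem pvLoop_ref (cs : List Char) :
    ∀ (n i : Nat) (cell : Int), cs.length - i = n →
      pvLoop cs cell i = pvRefL cell ((cs.drop i).map fun c => (c.toNat : Int)) := by
  intro n
  induction n with
  | zero =>
    intro i cell hn
    have h : cs.length ≤ i := by omega
    rw [pvLoop_exit cs cell i h, List.drop_eq_nil_of_le h]
    rfl
  | succ m ih =>
    intro i cell hn
    have h : i < cs.length := by omega
    rw [pvLoop_step cs i h cell,
      List.drop_eq_getElem_cons h, List.map_cons]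
    have hcode : pvCode cs i = ((cs[i].toNat : Int)) := by
      unfold pvCode
      rw [List.getD_eq_getElem?_getD, List.getElem?_eq_getElem h]
      rfl
    rw [show pvRefL cell ((cs[i].toNat : Int) :: (cs.drop (i + 1)).map fun c => (c.toNat : Int))
        = pvSegL ((cs[i].toNat : Int), cell) ++
            pvRefL (cs[i].toNat : Int) ((cs.drop (i + 1)).map fun c => (c.toNat : Int)) from rfl]
    rw [hcode, ih (i + 1) _ (by omega)]

theorem pvB_eq_ref (cmd : String) :
    generate_bf_simple_delta_alt cmd =
      String.ofList (pvRefL 0 (cmd.toList.map fun c => (c.toNat : Int))) := by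
  unfold generate_bf_simple_delta_alt
  rw [pvLoop_ref cmd.toList (cmd.toList.length - 0) 0 0 rfl]
  rfl

-- ===== VERDICT (by name: the statement is the Claim_ definition above) =====
theorem generate_bf_simple_delta_spec : Claim_equal_generate_bf_simple_delta := by
  intro cmd _
  unfold Spec_generate_bf_simple_delta
  rw [pvA_eq_ref, pvB_eq_ref]
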